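-- pv_equiv track=rewrite | github.com/looloolalaa/Python-Challenge | BOJ_차트.py | line_count
-- ===== SOURCE A (Python) =====
-- def line_count(p):
--     now = 0
--     right, left = set(), set()
--     for n in p:
--         if now < 50:
--             right.add(now)
--         else:
--             left.add(now - 50)
--         now += n
--
--     return len(left & right)
-- ===== SOURCE B (Python) =====
-- def line_count(p):
--     pos = []
--     now = 0
--     for n in p:
--         pos.append(now)
--         now += n
--     xs = sorted(set(pos))
--     ys = [v + 50 for v in xs]
--     i = j = cnt = 0
--     while i < len(xs) and j < len(ys):
--         if xs[i] < ys[j]: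
--             i += 1
--         elif ys[j] < xs[i]:
--             j += 1
--         else:
--             if 50 <= xs[i] < 100:
--                 cnt += 1
--             i += 1
--             j += 1
--     return cnt
-- ===== Notes on version B (the rewrite author's own statement) =====
-- stated objective: alternative
-- what changed: B records prefix positions in a plain list, sorts the distinct values, and counts coincidences with a two-pointer merge of the sorted list against its +50-shifted copy (keeping values in [50,100)), replacing A's two threshold-partitioned hash sets and their set intersection.
import Mathlib
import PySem

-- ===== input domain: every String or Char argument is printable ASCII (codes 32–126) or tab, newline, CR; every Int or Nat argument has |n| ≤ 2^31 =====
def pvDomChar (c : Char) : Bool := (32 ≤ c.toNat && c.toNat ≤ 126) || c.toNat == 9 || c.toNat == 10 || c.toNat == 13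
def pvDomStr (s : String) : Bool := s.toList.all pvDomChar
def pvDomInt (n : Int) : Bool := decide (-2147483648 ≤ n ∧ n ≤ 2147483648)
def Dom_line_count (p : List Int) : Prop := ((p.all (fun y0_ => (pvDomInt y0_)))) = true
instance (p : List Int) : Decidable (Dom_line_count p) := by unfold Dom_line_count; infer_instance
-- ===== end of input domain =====

-- B records the prefix positions as a plain list, sorts their distinct values, and counts
-- coincidences by a two-pointer merge of the sorted list with its copy shifted by +50
-- (kept when 50 ≤ value < 100), instead of A's two threshold-partitioned sets and a set
-- intersection (objective: alternative; sorted-merge instead of hashing, same order of cost).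

-- ===== PORT A =====
def line_count (p : List Int) : Int :=
  let st := p.foldl
    (fun (st : Int × PySem.Set Int × PySem.Set Int) n =>
      if st.1 < 50 then (st.1 + n, PySem.Set.add st.2.1 st.1, st.2.2)
      else (st.1 + n, st.2.1, PySem.Set.add st.2.2 (st.1 - 50)))
    (0, PySem.Set.empty, PySem.Set.empty)
  PySem.Set.len (PySem.Set.inter st.2.2 st.2.1)

-- ===== PORT B =====
-- two-pointer merge over the two sorted index ranges (the `while i < len(xs) and j < len(ys)`
-- loop of Source B, transcribed as recursion on the two list suffixes)
def lcMerge : List Int → List Int → Int → Int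
  | [], _, cnt => cnt
  | _ :: _, [], cnt => cnt
  | x :: xs, y :: ys, cnt =>
      if x < y then lcMerge xs (y :: ys) cnt
      else if y < x then lcMerge (x :: xs) ys cnt
      else lcMerge xs ys (if 50 ≤ x ∧ x < 100 then cnt + 1 else cnt)
  termination_by a b _ => a.length + b.length

def line_count_alt (p : List Int) : Int :=
  let st := p.foldl (fun (st : List Int × Int) n => (st.1 ++ [st.2], st.2 + n)) ([], 0)
  let xs := PySem.List.sorted (PySem.Set.ofList st.1) (fun v => v) false
  let ys := xs.map (fun v => v + 50)
  lcMerge xs ys 0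

-- ===== PRECONDITION & SPEC =====
def Spec_line_count (p : List Int) (out : Int) : Prop := out = line_count_alt p
instance (p : List Int) (out : Int) : Decidable (Spec_line_count p out) := by unfold Spec_line_count; infer_instance

-- ===== CLAIM (what is proved, stated in full; the proofs are below) =====
def Claim_equal_line_count : Prop := ∀ (p : List Int), Dom_line_count p → Spec_line_count p (line_count p)

-- ===== LEMMAS AND PROOFS =====

-- Proof-side helper: the visited-position set as a PySem.Set fold.
def lcSetFold (p : List Int) (S : PySem.Set Int) (now : Int) : PySem.Set Int × Int :=
  p.foldl (fun (st : PySem.Set Int × Int) n => (PySem.Set.add st.1 st.2, st.2 + n)) (S, now)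

-- B's list-building fold tracks the set fold: same running total, and the distinct
-- elements of the position list are the set fold's set.
theorem lc_pos_set (p : List Int) : ∀ (l : List Int) (now : Int),
    PySem.Set.ofList ((p.foldl (fun (st : List Int × Int) n => (st.1 ++ [st.2], st.2 + n)) (l, now)).1)
      = (lcSetFold p (PySem.Set.ofList l) now).1 := by
  induction p with
  | nil => intro l now; rfl
  | cons n p ih =>
    intro l now
    have h : PySem.Set.ofList (l ++ [now]) = PySem.Set.add (PySem.Set.ofList l) now := by
      simp [PySem.Set.ofList_eq_foldl, List.foldl_append]
    simpa [lcSetFold, List.foldl_cons, h] using ih (l ++ [now]) (now + n)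

-- Invariant: running A's loop from a state whose `right`/`left` sets are the <50 / ≥50
-- partition (shifted by 50) of a nodup visited-set S reaches the partition of the final
-- visited-set, which stays nodup.
theorem lc_inv (p : List Int) : ∀ (S : List Int) (now : Int), S.Nodup →
    (p.foldl
      (fun (st : Int × PySem.Set Int × PySem.Set Int) n =>
        if st.1 < 50 then (st.1 + n, PySem.Set.add st.2.1 st.1, st.2.2)
        else (st.1 + n, st.2.1, PySem.Set.add st.2.2 (st.1 - 50)))
      (now, S.filter (fun v => decide (v < 50)), (S.filter (fun v => decide (50 ≤ v))).map (fun v => v - 50))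
      = ((lcSetFold p S now).2,
         (lcSetFold p S now).1.filter (fun v => decide (v < 50)),
         ((lcSetFold p S now).1.filter (fun v => decide (50 ≤ v))).map (fun v => v - 50)))
    ∧ (lcSetFold p S now).1.Nodup := by
  induction p with
  | nil => intro S now hS; exact ⟨rfl, hS⟩
  | cons n p ih =>
    intro S now hS
    have hstep :
        (fun (st : Int × PySem.Set Int × PySem.Set Int) n =>
          if st.1 < 50 then (st.1 + n, PySem.Set.add st.2.1 st.1, st.2.2)
          else (st.1 + n, st.2.1, PySem.Set.add st.2.2 (st.1 - 50)))
          (now, S.filter (fun v => decide (v < 50)),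
            (S.filter (fun v => decide (50 ≤ v))).map (fun v => v - 50)) n
        = (now + n, (PySem.Set.add S now).filter (fun v => decide (v < 50)),
           ((PySem.Set.add S now).filter (fun v => decide (50 ≤ v))).map (fun v => v - 50)) := by
      show (if now < 50 then _ else _) = _
      by_cases hm : now ∈ S
      · by_cases hlt : now < 50
        · have hmem : now ∈ S.filter (fun v => decide (v < 50)) := by
            simp [List.mem_filter, hm, hlt]
          rw [if_pos hlt, PySem.Set.add_of_mem hm, PySem.Set.add_of_mem hmem]
        · have hmem : now - 50 ∈ (S.filter (fun v => decide (50 ≤ v))).map (fun v => v - 50) := by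
            refine List.mem_map.mpr ⟨now, ?_, rfl⟩
            simp only [List.mem_filter, decide_eq_true_eq]
            exact ⟨hm, by omega⟩
          rw [if_neg hlt, PySem.Set.add_of_mem hm, PySem.Set.add_of_mem hmem]
      · rw [PySem.Set.add_of_not_mem hm]
        by_cases hlt : now < 50
        · have h1 : now ∉ S.filter (fun v => decide (v < 50)) := fun h => hm (List.mem_filter.mp h).1
          have e1 : List.filter (fun v => decide (v < 50)) [now] = [now] := by simp [hlt]
          have e2 : List.filter (fun v => decide (50 ≤ v)) [now] = [] := by simp; omega
          rw [if_pos hlt, PySem.Set.add_of_not_mem h1, List.filter_append, List.filter_append,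
            e1, e2, List.append_nil]
        · have h1 : now - 50 ∉ (S.filter (fun v => decide (50 ≤ v))).map (fun v => v - 50) := by
            intro h
            rcases List.mem_map.mp h with ⟨v, hv, he⟩
            have : v = now := by omega
            exact hm (this ▸ (List.mem_filter.mp hv).1)
          have e1 : List.filter (fun v => decide (v < 50)) [now] = [] := by simp; omega
          have e2 : List.filter (fun v => decide (50 ≤ v)) [now] = [now] := by simp; omega
          rw [if_neg hlt, PySem.Set.add_of_not_mem h1, List.filter_append, List.filter_append,
            e1, e2, List.append_nil, List.map_append, List.map_cons, List.map_nil]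
    have hS' : (PySem.Set.add S now).Nodup := PySem.Set.nodup_add S now hS
    have hih := ih (PySem.Set.add S now) (now + n) hS'
    refine ⟨?_, hih.2⟩
    show List.foldl _ _ p = _
    rw [hstep]
    exact hih.1

-- Cardinality of A's intersection as a filter-count over the nodup visited-set S.
theorem lc_inter_len (S : List Int) :
    PySem.Set.len (PySem.Set.inter ((S.filter (fun v => decide (50 ≤ v))).map (fun v => v - 50))
        (S.filter (fun v => decide (v < 50))))
    = ((S.filter (fun v => decide (50 ≤ v ∧ v < 100 ∧ (v - 50) ∈ S))).length : Int) := by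
  unfold PySem.Set.len PySem.Set.inter
  rw [List.filter_map, List.length_map, List.filter_filter]
  norm_cast
  congr 1
  refine List.filter_congr ?_
  intro x _
  rw [Bool.eq_iff_iff]
  simp only [Function.comp_apply, Bool.and_eq_true, decide_eq_true_eq,
    PySem.Set.contains_iff, List.mem_filter, decide_eq_true_eq]
  constructor
  · rintro ⟨⟨h1, h2⟩, h3⟩; exact ⟨h3, by omega, h1⟩
  · rintro ⟨h1, h2, h3⟩; exact ⟨⟨h3, by omega⟩, h1⟩

-- Merge-count correctness: on strictly increasing lists the two-pointer merge counts
-- the common values lying in [50, 100).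
theorem lc_merge_count : ∀ (xs ys : List Int) (cnt : Int),
    xs.Pairwise (· < ·) → ys.Pairwise (· < ·) →
    lcMerge xs ys cnt
      = cnt + ((xs.filter (fun x => decide ((50 ≤ x ∧ x < 100) ∧ x ∈ ys))).length : Int)
  | [], ys, cnt, _, _ => by simp [lcMerge]
  | x :: xs, [], cnt, _, _ => by simp [lcMerge]
  | x :: xs, y :: ys, cnt, hx, hy => by
    have hx' := List.pairwise_cons.mp hx
    have hy' := List.pairwise_cons.mp hy
    rw [lcMerge]
    by_cases h1 : x < y
    · rw [if_pos h1, lc_merge_count xs (y :: ys) cnt hx'.2 hy]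
      have hnm : ¬ ((50 ≤ x ∧ x < 100) ∧ x ∈ y :: ys) := by
        rintro ⟨-, hmem⟩
        rcases List.mem_cons.mp hmem with rfl | hm
        · omega
        · exact absurd (hy'.1 x hm) (by omega)
      rw [List.filter_cons, if_neg (by simp only [decide_eq_true_eq]; exact hnm)]
    · rw [if_neg h1]
      by_cases h2 : y < x
      · rw [if_pos h2, lc_merge_count (x :: xs) ys cnt hx hy'.2]
        have hfc : List.filter (fun z => decide ((50 ≤ z ∧ z < 100) ∧ z ∈ y :: ys)) (x :: xs)
            = List.filter (fun z => decide ((50 ≤ z ∧ z < 100) ∧ z ∈ ys)) (x :: xs) := by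
          refine List.filter_congr ?_
          intro z hz
          have hzy : y < z := by
            rcases List.mem_cons.mp hz with rfl | hm
            · exact h2
            · exact lt_trans h2 (hx'.1 z hm)
          refine decide_eq_decide.mpr ?_
          constructor
          · rintro ⟨hr, hm⟩
            rcases List.mem_cons.mp hm with rfl | hm'
            · omega
            · exact ⟨hr, hm'⟩
          · rintro ⟨hr, hm⟩; exact ⟨hr, List.mem_cons_of_mem _ hm⟩
        rw [hfc]
      · have hxy : x = y := by omega
        rw [if_neg h2, lc_merge_count xs ys _ hx'.2 hy'.2]
        subst hxy
        have hxnys : x ∉ ys := fun hm => absurd (hy'.1 x hm) (by omega)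
        have hmemfix : ∀ z ∈ xs,
            (decide ((50 ≤ z ∧ z < 100) ∧ z ∈ x :: ys))
              = (decide ((50 ≤ z ∧ z < 100) ∧ z ∈ ys)) := by
          intro z hz
          have hxz : x < z := hx'.1 z hz
          refine decide_eq_decide.mpr ?_
          constructor
          · rintro ⟨hr, hm⟩
            rcases List.mem_cons.mp hm with rfl | hm'
            · omega
            · exact ⟨hr, hm'⟩
          · rintro ⟨hr, hm⟩; exact ⟨hr, List.mem_cons_of_mem _ hm⟩
        rw [List.filter_cons]
        by_cases hr : 50 ≤ x ∧ x < 100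
        · have : ((50 ≤ x ∧ x < 100) ∧ x ∈ x :: ys) := ⟨hr, List.mem_cons_self⟩
          rw [if_pos hr, if_pos (by simpa using this), List.filter_congr hmemfix,
            List.length_cons]
          push_cast; ring
        · have : ¬ ((50 ≤ x ∧ x < 100) ∧ x ∈ x :: ys) := fun h => hr h.1
          rw [if_neg hr, if_neg (by simpa using this), List.filter_congr hmemfix]
  termination_by xs ys _ => xs.length + ys.length

-- ===== VERDICT (by name: the statement is the Claim_ definition above) =====
theorem line_count_spec : Claim_equal_line_count := by
  intro p _
  have hinv := lc_inv p [] 0 List.nodup_nil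
  simp only [List.filter_nil, List.map_nil] at hinv
  show PySem.Set.len (PySem.Set.inter
      (p.foldl
        (fun (st : Int × PySem.Set Int × PySem.Set Int) n =>
          if st.1 < 50 then (st.1 + n, PySem.Set.add st.2.1 st.1, st.2.2)
          else (st.1 + n, st.2.1, PySem.Set.add st.2.2 (st.1 - 50)))
        ((0 : Int), ([] : List Int), ([] : List Int))).2.2
      (p.foldl
        (fun (st : Int × PySem.Set Int × PySem.Set Int) n =>
          if st.1 < 50 then (st.1 + n, PySem.Set.add st.2.1 st.1, st.2.2)
          else (st.1 + n, st.2.1, PySem.Set.add st.2.2 (st.1 - 50)))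
        ((0 : Int), ([] : List Int), ([] : List Int))).2.1)
    = line_count_alt p
  rw [hinv.1]
  set S := (lcSetFold p ([] : List Int) 0).1 with hSdef
  have hSnd : S.Nodup := hinv.2
  rw [lc_inter_len S]
  -- now the B side
  have halt : line_count_alt p
      = lcMerge
          (PySem.List.sorted (PySem.Set.ofList
            ((p.foldl (fun (st : List Int × Int) n => (st.1 ++ [st.2], st.2 + n)) (([] : List Int), (0 : Int))).1)) (fun v => v) false)
          ((PySem.List.sorted (PySem.Set.ofList
            ((p.foldl (fun (st : List Int × Int) n => (st.1 ++ [st.2], st.2 + n)) (([] : List Int), (0 : Int))).1)) (fun v => v) false).map (fun v => v + 50))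
          0 := rfl
  rw [halt]
  have hpos : PySem.Set.ofList
      ((p.foldl (fun (st : List Int × Int) n => (st.1 ++ [st.2], st.2 + n)) (([] : List Int), (0 : Int))).1) = S := by
    rw [lc_pos_set p [] 0]; rfl
  rw [hpos]
  clear halt
  set xs := PySem.List.sorted S (fun v => v) false with hxs
  have hperm : xs.Perm S := PySem.List.sorted_perm S (fun v => v) false
  have hxp : xs.Pairwise (· < ·) := by
    have hSofs : PySem.Set.ofList S = S := PySem.Set.ofList_eq_self_of_nodup S hSnd
    have := PySem.List.sorted_ofList_pairwise_lt (xs := S)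
    rwa [hSofs] at this
  have hyp : (xs.map (fun v => v + 50)).Pairwise (· < ·) :=
    List.Pairwise.map _ (fun a b h => by omega) hxp
  rw [lc_merge_count xs (xs.map (fun v => v + 50)) 0 hxp hyp, zero_add]
  have hmemeq : ∀ z ∈ xs,
      (decide ((50 ≤ z ∧ z < 100) ∧ z ∈ xs.map (fun v => v + 50)))
        = (decide (50 ≤ z ∧ z < 100 ∧ (z - 50) ∈ S)) := by
    intro z _
    refine decide_eq_decide.mpr ?_
    constructor
    · rintro ⟨⟨h1, h2⟩, hm⟩
      rcases List.mem_map.mp hm with ⟨v, hv, he⟩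
      have : v = z - 50 := by omega
      exact ⟨h1, h2, this ▸ hperm.mem_iff.mp hv⟩
    · rintro ⟨h1, h2, h3⟩
      exact ⟨⟨h1, h2⟩, List.mem_map.mpr ⟨z - 50, hperm.mem_iff.mpr h3, by omega⟩⟩
  rw [List.filter_congr hmemeq]
  have hfp : (xs.filter (fun z => decide (50 ≤ z ∧ z < 100 ∧ (z - 50) ∈ S))).Perm
      (S.filter (fun v => decide (50 ≤ v ∧ v < 100 ∧ (v - 50) ∈ S))) := hperm.filter _
  rw [hfp.length_eq]
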